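-- pv_equiv track=rewrite | github.com/pypi-data/pypi-mirror-402 | packages/abagentsdk/abagentsdk-0.9.1-py3-none-any.whl/abagentsdk/providers/groq_catalog.py | best_default
-- ===== SOURCE A (Python) =====
-- from typing import List, Dict, Optional, Tuple
--
-- _GROQ_MODELS: List[str] = [
--     # Qwen models
--     "qwen/qwen3-32b",
--     "qwen/qwen-2.5-72b-instruct",
--     "qwen/qwen-2.5-32b-instruct",
--     "qwen/qwen-2.5-7b-instruct",
--
--     # Llama models
--     "llama-3.3-70b-versatile",
--     "llama-3.1-70b-versatile",
--     "llama-3.1-8b-instant",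
--     "llama3-70b-8192",
--     "llama3-8b-8192",
--
--     # Mixtral models
--     "mixtral-8x7b-32768",
--
--     # DeepSeek models
--     "deepseek-r1-distill-llama-70b",
--
--     # Gemma models
--     "gemma2-9b-it",
--     "gemma-7b-it",
-- ]
--
-- def list_groq_models() -> List[str]:
--     """Return list of available Groq models."""
--     return list(_GROQ_MODELS)
--
-- def best_default(goal: str = "balanced") -> str:
--     """
--     goal in {"speed","balanced","quality"}
--     Returns a sensible default Groq model.
--     """
--     models = list_groq_models()
--
--     # quality: prefer larger models
--     if goal == "quality":
--         for cand in ["llama-3.3-70b-versatile", "qwen/qwen-2.5-72b-instruct", "llama-3.1-70b-versatile"]: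
--             if cand in models:
--                 return cand
--
--     # speed: prefer smaller/instant models
--     if goal == "speed":
--         for cand in ["llama-3.1-8b-instant", "llama3-8b-8192", "qwen/qwen-2.5-7b-instruct"]:
--             if cand in models:
--                 return cand
--
--     # balanced: prefer mid-size models
--     for cand in ["qwen/qwen3-32b", "qwen/qwen-2.5-32b-instruct", "llama-3.1-70b-versatile"]:
--         if cand in models:
--             return cand
--
--     # Fallback
--     return models[0] if models else "qwen/qwen3-32b"
-- ===== SOURCE B (Python) =====
-- _DEFAULTS = {
--     "quality": "llama-3.3-70b-versatile",
--     "speed": "llama-3.1-8b-instant",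
-- }
--
-- def best_default(goal: str = "balanced") -> str:
--     """Constant dispatch: every candidate A would pick first is present in the
--     fixed model list, so only a table lookup with a balanced fallback is needed."""
--     return _DEFAULTS.get(goal, "qwen/qwen3-32b")
-- ===== Notes on version B (the rewrite author's own statement) =====
-- stated objective: simpler
-- what changed: Replaced the three candidate-scan loops over the fixed model list with a single constant dict lookup keyed by goal, with the balanced model as the .get default.
import Mathlib
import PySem

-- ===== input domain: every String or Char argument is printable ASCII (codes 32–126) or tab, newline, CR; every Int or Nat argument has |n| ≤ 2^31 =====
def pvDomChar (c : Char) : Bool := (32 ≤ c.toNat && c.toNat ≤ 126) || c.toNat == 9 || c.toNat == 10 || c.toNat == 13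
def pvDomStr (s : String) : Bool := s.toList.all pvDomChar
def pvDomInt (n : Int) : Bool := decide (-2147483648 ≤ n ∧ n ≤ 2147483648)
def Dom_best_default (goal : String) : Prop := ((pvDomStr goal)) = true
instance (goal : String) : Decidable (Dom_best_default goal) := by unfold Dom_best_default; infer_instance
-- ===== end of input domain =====

-- B replaces A's three candidate-scan loops with one constant table lookup (objective: simpler).


-- ===== PORT A =====
def pvGroqModels : List String :=
  ["qwen/qwen3-32b", "qwen/qwen-2.5-72b-instruct", "qwen/qwen-2.5-32b-instruct",
   "qwen/qwen-2.5-7b-instruct", "llama-3.3-70b-versatile", "llama-3.1-70b-versatile",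
   "llama-3.1-8b-instant", "llama3-70b-8192", "llama3-8b-8192", "mixtral-8x7b-32768",
   "deepseek-r1-distill-llama-70b", "gemma2-9b-it", "gemma-7b-it"]

def list_groq_models : List String := pvGroqModels

-- the 'for cand in [...]: if cand in models: return cand' loop, returning none on fall-through
def pvScan (cands models : List String) : Option String :=
  match cands with
  | [] => none
  | c :: rest => if c ∈ models then some c else pvScan rest models

def best_default (goal : String) : String :=
  let models := list_groq_models
  let rq : Option String :=
    if goal == "quality" then
      pvScan ["llama-3.3-70b-versatile", "qwen/qwen-2.5-72b-instruct", "llama-3.1-70b-versatile"] models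
    else none
  match rq with
  | some c => c
  | none =>
    let rs : Option String :=
      if goal == "speed" then
        pvScan ["llama-3.1-8b-instant", "llama3-8b-8192", "qwen/qwen-2.5-7b-instruct"] models
      else none
    match rs with
    | some c => c
    | none =>
      match pvScan ["qwen/qwen3-32b", "qwen/qwen-2.5-32b-instruct", "llama-3.1-70b-versatile"] models with
      | some c => c
      | none => match models with
                | [] => "qwen/qwen3-32b"
                | m :: _ => m

-- ===== PORT B =====
def pvDefaults : PySem.Dict String String := PySem.Dict.ofList
  [("quality", "llama-3.3-70b-versatile"), ("speed", "llama-3.1-8b-instant")]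

def best_default_alt (goal : String) : String :=
  PySem.Dict.getD pvDefaults goal "qwen/qwen3-32b"

-- ===== PRECONDITION & SPEC =====
def Spec_best_default (goal : String) (out : String) : Prop := out = best_default_alt goal
instance (goal : String) (out : String) : Decidable (Spec_best_default goal out) := by unfold Spec_best_default; infer_instance

-- ===== CLAIM (what is proved, stated in full; the proofs are below) =====
def Claim_equal_best_default : Prop := ∀ (goal : String), Dom_best_default goal → Spec_best_default goal (best_default goal)

-- ===== LEMMAS AND PROOFS =====

-- ===== VERDICT (by name: the statement is the Claim_ definition above) =====
theorem best_default_spec : Claim_equal_best_default := by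
  intro goal _
  unfold Spec_best_default best_default best_default_alt list_groq_models pvGroqModels pvDefaults
  by_cases hq : goal = "quality"
  · subst hq; decide
  · by_cases hs : goal = "speed"
    · subst hs; decide
    · have h : (PySem.Dict.ofList [("quality", "llama-3.3-70b-versatile"),
          ("speed", "llama-3.1-8b-instant")] : PySem.Dict String String).items =
          [("quality", "llama-3.3-70b-versatile"), ("speed", "llama-3.1-8b-instant")] := rfl
      have h2 : ("speed" == goal) = false := by simp [Ne.symm hs]
      have h1 : ("quality" == goal) = false := by simp [Ne.symm hq]
      simp [PySem.Dict.getD, PySem.Dict.get?, h, List.find?, hq, hs, h1, h2, pvScan]
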